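-- pv_equiv track=rewrite | github.com/Kevin-Nguyen-24/Chatbot_VWAT | rag_system.py | is_query_relevant
-- ===== SOURCE A (Python) =====
-- def is_query_relevant(query: str, language: str = 'vi') -> bool:
--     """Check if query is related to VWAT services, programs, or organization"""
--     query_lower = query.lower()
--
--     # Keywords related to VWAT services and topics
--     vwat_keywords = [
--         # English keywords
--         'vwat', 'vietnamese', 'refugee', 'immigrant', 'immigration', 'newcomer',
--         'settlement', 'service', 'program', 'help', 'assist', 'support',
--         'appointment', 'contact', 'address', 'location', 'hours', 'email', 'phone',
--         'employment', 'job', 'work', 'language', 'english', 'esl', 'linc',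
--         'housing', 'rent', 'accommodation', 'legal', 'tax', 'health', 'medical',
--         'family', 'youth', 'senior', 'children', 'education', 'school',
--         'citizenship', 'pr card', 'visa', 'document', 'translation',
--         'counseling', 'mental health', 'workshop', 'class', 'training',
--         'toronto', 'organization', 'non-profit', 'volunteer', 'donate',
--         # Vietnamese keywords
--         'dịch vụ', 'chương trình', 'hỗ trợ', 'giúp đỡ', 'người nhập cư', 'tị nạn',
--         'định cư', 'liên hệ', 'địa chỉ', 'giờ làm việc', 'điện thoại',
--         'việc làm', 'công việc', 'tiếng anh', 'nhà ở', 'thuê nhà', 'pháp lý',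
--         'thuế', 'sức khỏe', 'y tế', 'gia đình', 'thanh thiếu niên', 'người cao tuổi',
--         'trẻ em', 'giáo dục', 'trường học', 'quốc tịch', 'tư vấn', 'lớp học',
--         'đào tạo', 'tổ chức', 'tình nguyện', 'quyên góp', 'hẹn gặp'
--     ]
--
--     # Off-topic keywords that indicate irrelevant queries
--     off_topic_keywords = [
--         'weather', 'thời tiết', 'nấu ăn', 'cooking', 'recipe', 'công thức', 'cook', 'pasta', 'food',
--         'sport', 'thể thao', 'movie', 'phim', 'music', 'nhạc', 'football', 'soccer', 'basketball',
--         'game', 'trò chơi', 'shopping', 'mua sắm', 'fashion', 'thời trang',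
--         'restaurant', 'nhà hàng', 'travel', 'du lịch', 'vacation', 'nghỉ mát',
--         # Financial/currency queries
--         'usd', 'cad', 'currency', 'exchange rate', 'tỷ giá', 'dollar', 'euro',
--         'stock', 'cổ phiếu', 'crypto', 'bitcoin', 'forex', 'trading'
--     ]
--
--     # Check for off-topic keywords first
--     for keyword in off_topic_keywords:
--         if keyword in query_lower:
--             return False
--
--     # Check for VWAT-related keywords
--     for keyword in vwat_keywords:
--         if keyword in query_lower:
--             return True
--
--     # If no clear match, retrieve documents and check relevance score
--     # This is more lenient for ambiguous queries
--     return True  # Let RAG system handle it if unclear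
-- ===== SOURCE B (Python) =====
-- def is_query_relevant(query: str, language: str = 'vi') -> bool:
--     """Text-driven scan: walk the lowercased query position by position and
--     report irrelevant iff some off-topic keyword starts at some position.
--     (The VWAT keyword table of the original is dead code: match and
--     fall-through both return True.)"""
--     off_topic_keywords = [
--         'weather', 'thời tiết', 'nấu ăn', 'cooking', 'recipe', 'công thức', 'cook', 'pasta', 'food',
--         'sport', 'thể thao', 'movie', 'phim', 'music', 'nhạc', 'football', 'soccer', 'basketball',
--         'game', 'trò chơi', 'shopping', 'mua sắm', 'fashion', 'thời trang',
--         'restaurant', 'nhà hàng', 'travel', 'du lịch', 'vacation', 'nghỉ mát',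
--         'usd', 'cad', 'currency', 'exchange rate', 'tỷ giá', 'dollar', 'euro',
--         'stock', 'cổ phiếu', 'crypto', 'bitcoin', 'forex', 'trading'
--     ]
--     q = query.lower()
--     for i in range(len(q) + 1):
--         if any(q.startswith(k, i) for k in off_topic_keywords):
--             return False
--     return True
-- ===== Notes on version B (the rewrite author's own statement) =====
-- stated objective: alternative
-- what changed: B drops the dead vwat_keywords table and its loop (match and fall-through both return True) and replaces A's pattern-driven scan (per-keyword 'in' substring search) by a text-driven scan: one walk over the positions of the lowercased query, testing at each position whether any off-topic keyword starts there.
import Mathlib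
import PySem

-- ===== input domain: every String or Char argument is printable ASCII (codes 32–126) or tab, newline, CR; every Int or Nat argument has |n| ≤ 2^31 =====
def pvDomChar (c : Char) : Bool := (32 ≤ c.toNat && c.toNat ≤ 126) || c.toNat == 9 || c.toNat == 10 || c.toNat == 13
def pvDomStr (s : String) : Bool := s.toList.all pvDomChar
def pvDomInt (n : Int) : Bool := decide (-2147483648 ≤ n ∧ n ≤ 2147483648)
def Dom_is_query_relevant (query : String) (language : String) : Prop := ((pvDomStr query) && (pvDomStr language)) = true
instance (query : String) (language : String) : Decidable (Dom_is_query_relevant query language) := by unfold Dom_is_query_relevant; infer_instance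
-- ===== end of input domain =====

-- B drops A's dead vwat_keywords table (match and fall-through both return True) and replaces the
-- pattern-driven per-keyword substring search by one text-driven scan over the query's positions,
-- testing at each position whether an off-topic keyword starts there; objective: alternative.

-- ===== PORT A =====
-- A's two keyword tables, verbatim
def vwat_keywords_a : List String :=
  ["vwat", "vietnamese", "refugee", "immigrant", "immigration", "newcomer",
   "settlement", "service", "program", "help", "assist", "support",
   "appointment", "contact", "address", "location", "hours", "email", "phone",
   "employment", "job", "work", "language", "english", "esl", "linc",
   "housing", "rent", "accommodation", "legal", "tax", "health", "medical",
   "family", "youth", "senior", "children", "education", "school",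
   "citizenship", "pr card", "visa", "document", "translation",
   "counseling", "mental health", "workshop", "class", "training",
   "toronto", "organization", "non-profit", "volunteer", "donate",
   "dịch vụ", "chương trình", "hỗ trợ", "giúp đỡ", "người nhập cư", "tị nạn",
   "định cư", "liên hệ", "địa chỉ", "giờ làm việc", "điện thoại",
   "việc làm", "công việc", "tiếng anh", "nhà ở", "thuê nhà", "pháp lý",
   "thuế", "sức khỏe", "y tế", "gia đình", "thanh thiếu niên", "người cao tuổi",
   "trẻ em", "giáo dục", "trường học", "quốc tịch", "tư vấn", "lớp học",
   "đào tạo", "tổ chức", "tình nguyện", "quyên góp", "hẹn gặp"]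

def off_topic_keywords_a : List String :=
  ["weather", "thời tiết", "nấu ăn", "cooking", "recipe", "công thức", "cook", "pasta", "food",
   "sport", "thể thao", "movie", "phim", "music", "nhạc", "football", "soccer", "basketball",
   "game", "trò chơi", "shopping", "mua sắm", "fashion", "thời trang",
   "restaurant", "nhà hàng", "travel", "du lịch", "vacation", "nghỉ mát",
   "usd", "cad", "currency", "exchange rate", "tỷ giá", "dollar", "euro",
   "stock", "cổ phiếu", "crypto", "bitcoin", "forex", "trading"]

-- "for keyword in …: if keyword in query_lower: return …" = first match decides, else fall through
def is_query_relevant (query : String) (language : String) : Bool :=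
  let query_lower := PySem.Str.lower query
  match off_topic_keywords_a.find? (fun keyword => PySem.Str.isIn keyword query_lower) with
  | some _ => false
  | none =>
    match vwat_keywords_a.find? (fun keyword => PySem.Str.isIn keyword query_lower) with
    | some _ => true
    | none => true

-- ===== PORT B =====
def off_topic_keywords_b : List String :=
  ["weather", "thời tiết", "nấu ăn", "cooking", "recipe", "công thức", "cook", "pasta", "food",
   "sport", "thể thao", "movie", "phim", "music", "nhạc", "football", "soccer", "basketball",
   "game", "trò chơi", "shopping", "mua sắm", "fashion", "thời trang",
   "restaurant", "nhà hàng", "travel", "du lịch", "vacation", "nghỉ mát",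
   "usd", "cad", "currency", "exchange rate", "tỷ giá", "dollar", "euro",
   "stock", "cổ phiếu", "crypto", "bitcoin", "forex", "trading"]

-- "any(tail.startswith(k) for k in off_topic_keywords)" at the current position
def offTopicStartsHere (tail : List Char) : Bool :=
  off_topic_keywords_b.any (fun k => PySem.Chars.startswith tail k.toList)

-- "for i in range(len(q)+1): tail = q[i:] …": structural recursion over the suffixes of q
def scanOffTopic : List Char → Bool
  | [] => offTopicStartsHere []
  | c :: rest => offTopicStartsHere (c :: rest) || scanOffTopic rest

def is_query_relevant_alt (query : String) (language : String) : Bool :=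
  !(scanOffTopic (PySem.Str.lower query).toList)

-- ===== PRECONDITION & SPEC =====
def Spec_is_query_relevant (query : String) (language : String) (out : Bool) : Prop := out = is_query_relevant_alt query language
instance (query : String) (language : String) (out : Bool) : Decidable (Spec_is_query_relevant query language out) := by unfold Spec_is_query_relevant; infer_instance

-- ===== CLAIM (what is proved, stated in full; the proofs are below) =====
def Claim_equal_is_query_relevant : Prop := ∀ (query : String) (language : String), Dom_is_query_relevant query language → Spec_is_query_relevant query language (is_query_relevant query language)

-- ===== LEMMAS AND PROOFS =====

-- the scan over suffixes finds exactly the positions j with a keyword prefix of s.drop j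
theorem scanOffTopic_true_iff (s : List Char) :
    scanOffTopic s = true ↔ ∃ j, offTopicStartsHere (s.drop j) = true := by
  induction s with
  | nil =>
      constructor
      · intro h; exact ⟨0, h⟩
      · rintro ⟨j, hj⟩; simpa [scanOffTopic] using hj
  | cons c rest ih =>
      simp only [scanOffTopic, Bool.or_eq_true, ih]
      constructor
      · rintro (h | ⟨j, hj⟩)
        · exact ⟨0, h⟩
        · exact ⟨j + 1, hj⟩
      · rintro ⟨j, hj⟩
        cases j with
        | zero => exact Or.inl hj
        | succ m => exact Or.inr ⟨m, hj⟩

-- the suffix scan decides exactly "some off-topic keyword is a substring of s"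
theorem scanOffTopic_eq_any_isIn (s : List Char) :
    scanOffTopic s = off_topic_keywords_b.any (fun k => PySem.Chars.isIn k.toList s) := by
  by_cases h : scanOffTopic s = true
  · obtain ⟨j, hj⟩ := (scanOffTopic_true_iff s).mp h
    obtain ⟨k, hk, hpre⟩ := List.any_eq_true.mp hj
    have hin : PySem.Chars.isIn k.toList s = true :=
      (PySem.Chars.exists_prefix_drop_iff_isIn _ _).mp
        ⟨j, (PySem.Chars.startswith_iff _ _).mp hpre⟩
    rw [h, Eq.comm]
    exact List.any_eq_true.mpr ⟨k, hk, hin⟩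
  · have h' := Bool.eq_false_iff.mpr (fun hc => h hc)
    rw [h', Eq.comm, Bool.eq_false_iff]
    intro hany
    obtain ⟨k, hk, hin⟩ := List.any_eq_true.mp hany
    obtain ⟨j, hpre⟩ := (PySem.Chars.exists_prefix_drop_iff_isIn _ _).mpr hin
    exact h ((scanOffTopic_true_iff s).mpr
      ⟨j, List.any_eq_true.mpr ⟨k, hk, (PySem.Chars.startswith_iff _ _).mpr hpre⟩⟩)

theorem str_isIn_eq (k s : String) :
    PySem.Str.isIn k s = PySem.Chars.isIn k.toList s.toList := by
  simp [PySem.Str.isIn]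

-- ===== VERDICT (by name: the statement is the Claim_ definition above) =====
theorem is_query_relevant_spec : Claim_equal_is_query_relevant := by
  intro query language _
  unfold Spec_is_query_relevant is_query_relevant is_query_relevant_alt
  rw [scanOffTopic_eq_any_isIn]
  dsimp only
  cases h : off_topic_keywords_a.find? (fun keyword => PySem.Str.isIn keyword (PySem.Str.lower query)) with
  | some k =>
      have hmem := List.mem_of_find?_eq_some h
      have hp := List.find?_some h
      have hany : off_topic_keywords_b.any
          (fun k => PySem.Chars.isIn k.toList (PySem.Str.lower query).toList) = true :=
        List.any_eq_true.mpr ⟨k, hmem, by rw [← str_isIn_eq]; exact hp⟩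
      rw [hany]
      rfl
  | none =>
      have hall := List.find?_eq_none.mp h
      have hanyf : off_topic_keywords_b.any
          (fun k => PySem.Chars.isIn k.toList (PySem.Str.lower query).toList) = false := by
        simp only [List.any_eq_false]
        intro x hx
        rw [← str_isIn_eq]
        simpa using hall x hx
      rw [hanyf]
      cases vwat_keywords_a.find? (fun keyword => PySem.Str.isIn keyword (PySem.Str.lower query)) <;> rfl
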